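-- pv_equiv track=rewrite | github.com/document-project/monster_parser | python/brand.py | _get_list_body
-- ===== SOURCE A (Python) =====
-- def _get_list_body(items):
--     list_body = ""
--     entry = ""
--     for item in items:
--         if item == "&":
--             list_body += "\\item " + entry
--             entry = ""
--         else:
--             entry += str(item) + " "
--     return list_body + "\\item " + entry
-- ===== SOURCE B (Python) =====
-- def _get_list_body(items):
--     return "\\item " + "".join(
--         "\\item " if item == "&" else str(item) + " " for item in items
--     )
-- ===== Notes on version B (the rewrite author's own statement) =====
-- stated objective: simpler
-- what changed: B replaces A's stateful scan with two interleaved string accumulators by a stateless per-token substitution: each '&' maps to '\item ' and every other item to item+' ', joined once after a leading '\item ' -- no entry buffer, no flush-on-delimiter logic.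
import Mathlib
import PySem

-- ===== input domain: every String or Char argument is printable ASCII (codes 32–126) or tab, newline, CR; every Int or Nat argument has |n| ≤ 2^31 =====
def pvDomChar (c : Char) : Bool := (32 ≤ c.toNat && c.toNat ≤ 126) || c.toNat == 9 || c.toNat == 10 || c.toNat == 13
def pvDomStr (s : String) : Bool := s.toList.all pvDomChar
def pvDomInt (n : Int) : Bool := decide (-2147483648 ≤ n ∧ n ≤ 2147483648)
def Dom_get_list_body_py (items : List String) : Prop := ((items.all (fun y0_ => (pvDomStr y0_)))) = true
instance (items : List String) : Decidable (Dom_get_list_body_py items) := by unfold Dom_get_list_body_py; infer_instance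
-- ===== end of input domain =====

-- B replaces A's two interleaved string accumulators by a stateless per-token
-- substitution joined once; objective: simpler (same cost).

-- ===== PORT A =====
-- A: one pass with two string accumulators (list_body, entry).
def get_list_body_py (items : List String) : String :=
  let st := items.foldl
    (fun (s : String × String) item =>
      if item == "&" then (s.1 ++ "\\item " ++ s.2, "") else (s.1, s.2 ++ item ++ " "))
    ("", "")
  st.1 ++ "\\item " ++ st.2

-- ===== PORT B =====
-- B: "\\item " ++ join of a stateless per-item substitution.
def get_list_body_py_alt (items : List String) : String :=
  "\\item " ++ String.join (items.map (fun item => if item == "&" then "\\item " else item ++ " "))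

-- ===== PRECONDITION & SPEC =====
def Spec_get_list_body_py (items : List String) (out : String) : Prop := out = get_list_body_py_alt items
instance (items : List String) (out : String) : Decidable (Spec_get_list_body_py items out) := by unfold Spec_get_list_body_py; infer_instance

-- ===== CLAIM (what is proved, stated in full; the proofs are below) =====
def Claim_equal_get_list_body_py : Prop := ∀ (items : List String), Dom_get_list_body_py items → Spec_get_list_body_py items (get_list_body_py items)

-- ===== LEMMAS AND PROOFS =====
theorem foldl_append_shift (xs : List String) (a : String) :
    List.foldl (fun r s => r ++ s) a xs = a ++ List.foldl (fun r s => r ++ s) "" xs := by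
  induction xs generalizing a with
  | nil => simp
  | cons y ys ih =>
      simp only [List.foldl]
      rw [ih (a ++ y), ih ("" ++ y)]
      simp [String.append_assoc]

theorem join_cons (x : String) (xs : List String) :
    String.join (x :: xs) = x ++ String.join xs := by
  simp only [String.join, List.foldl]
  rw [foldl_append_shift xs ("" ++ x)]
  simp

theorem fold_inv (items : List String) (lb e : String) :
    (let st := items.foldl
        (fun (s : String × String) item =>
          if item == "&" then (s.1 ++ "\\item " ++ s.2, "") else (s.1, s.2 ++ item ++ " "))
        (lb, e)
     st.1 ++ "\\item " ++ st.2)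
    = lb ++ "\\item " ++ e
        ++ String.join (items.map (fun item => if item == "&" then "\\item " else item ++ " ")) := by
  induction items generalizing lb e with
  | nil => simp [String.join]
  | cons x xs ih =>
      by_cases h : x = "&"
      · subst h
        simpa [join_cons, String.append_assoc] using ih (lb ++ "\\item " ++ e) ""
      · simpa [h, join_cons, String.append_assoc] using ih lb (e ++ x ++ " ")

-- ===== VERDICT (by name: the statement is the Claim_ definition above) =====
theorem get_list_body_py_spec : Claim_equal_get_list_body_py := by
  intro items _
  unfold Spec_get_list_body_py get_list_body_py get_list_body_py_alt
  simpa using fold_inv items "" ""
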